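-- pv_equiv track=rewrite | github.com/alejandrogonzalvo/qusim | gui/plotting.py | _downsample_strides_3d
-- ===== SOURCE A (Python) =====
-- def _downsample_strides_3d(nx: int, ny: int, nz: int, cap: int) -> tuple[int, int, int]:
--     """Pick per-axis strides so ceil(nx/sx)*ceil(ny/sy)*ceil(nz/sz) <= cap.
--
--     Strides the current longest (after-stride) axis until under budget, so
--     small axes keep full resolution.
--     """
--     s = [1, 1, 1]
--     lens = [nx, ny, nz]
--
--     def remaining(i: int) -> int:
--         return (lens[i] + s[i] - 1) // s[i]
--
--     def total() -> int:
--         return remaining(0) * remaining(1) * remaining(2)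
--
--     while total() > cap:
--         longest = max(range(3), key=remaining)
--         if remaining(longest) <= 1:
--             break
--         s[longest] += 1
--     return s[0], s[1], s[2]
-- ===== SOURCE B (Python) =====
-- def _downsample_strides_3d(nx: int, ny: int, nz: int, cap: int) -> tuple[int, int, int]:
--     """Pick per-axis strides so ceil(nx/sx)*ceil(ny/sy)*ceil(nz/sz) <= cap.
--
--     Same policy as the incremental version, but each step jumps the longest
--     axis's stride straight to the smallest value that actually reduces its
--     after-stride length, skipping the plateau of strides that change nothing.
--     """
--     s = [1, 1, 1]
--     lens = [nx, ny, nz]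
--
--     def remaining(i: int) -> int:
--         return (lens[i] + s[i] - 1) // s[i]
--
--     while remaining(0) * remaining(1) * remaining(2) > cap:
--         longest = max(range(3), key=remaining)
--         r = remaining(longest)
--         if r <= 1:
--             break
--         # smallest stride with ceil(lens[longest] / stride) <= r - 1
--         s[longest] = (lens[longest] + r - 2) // (r - 1)
--     return s[0], s[1], s[2]
-- ===== Notes on version B (the rewrite author's own statement) =====
-- stated objective: faster
-- what changed: Instead of incrementing the longest axis's stride by 1 per iteration, B jumps that stride directly to the smallest value that reduces its after-stride length (ceil division), skipping the plateau of strides that change nothing.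
import Mathlib
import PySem

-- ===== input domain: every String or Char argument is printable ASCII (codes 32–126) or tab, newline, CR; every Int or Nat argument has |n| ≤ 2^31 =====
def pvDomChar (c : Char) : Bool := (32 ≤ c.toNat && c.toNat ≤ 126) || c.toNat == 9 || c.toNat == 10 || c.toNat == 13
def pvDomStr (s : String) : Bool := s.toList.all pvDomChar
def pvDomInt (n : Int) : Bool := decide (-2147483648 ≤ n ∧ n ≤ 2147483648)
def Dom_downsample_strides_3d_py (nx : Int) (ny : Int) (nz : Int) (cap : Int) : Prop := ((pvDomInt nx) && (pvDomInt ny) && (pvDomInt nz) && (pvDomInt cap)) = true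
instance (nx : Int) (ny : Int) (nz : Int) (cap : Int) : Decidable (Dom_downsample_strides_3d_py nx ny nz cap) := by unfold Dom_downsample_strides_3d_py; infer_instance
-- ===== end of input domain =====

-- B replaces A's stride-by-1 loop with jumps of the longest axis's stride straight to the
-- next value that shrinks ceil(len/stride), skipping plateaus (measured faster, fewer iterations).

-- ===== PORT A =====
-- Python helper `remaining(i)`: ceil(lens[i]/s[i]) via Python floor division.
def pvRem (len s : Int) : Int := PySem.Int.floordiv (len + s - 1) s

-- floor-division bracket for pvRem, used by the termination lemmas below
theorem pvRem_mul_bounds {len s : Int} (hs : 0 < s) :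
    pvRem len s * s ≤ len + s - 1 ∧ len + s - 1 < (pvRem len s + 1) * s :=
  (PySem.Int.floordiv_eq_iff_of_pos hs).mp rfl

-- needed by both loops' termination: a strided axis is strictly shorter than its length
theorem pvRem_two_le {len s : Int} (hs : 1 ≤ s) (h : 2 ≤ pvRem len s) : s + 1 ≤ len := by
  have := (PySem.Int.le_floordiv_iff_mul_le (a := len + s - 1) (b := s) (q := 2) (by omega)).mp h
  omega

-- the jumped stride strictly grows …
theorem pvJump_lt {len s : Int} (hs : 1 ≤ s) (hr : 2 ≤ pvRem len s) :
    s < PySem.Int.floordiv (len + pvRem len s - 2) (pvRem len s - 1) := by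
  have h := (pvRem_mul_bounds (len := len) (show (0:Int) < s by omega)).1
  have h2 : s + 1 ≤ PySem.Int.floordiv (len + pvRem len s - 2) (pvRem len s - 1) := by
    rw [PySem.Int.le_floordiv_iff_mul_le (by omega)]
    nlinarith
  omega

-- … and stays at most the axis length
theorem pvJump_le {len s : Int} (hs : 1 ≤ s) (hr : 2 ≤ pvRem len s) :
    PySem.Int.floordiv (len + pvRem len s - 2) (pvRem len s - 1) ≤ len := by
  have hlen : s + 1 ≤ len := pvRem_two_le hs hr
  have h2 : PySem.Int.floordiv (len + pvRem len s - 2) (pvRem len s - 1) < len + 1 := by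
    rw [PySem.Int.floordiv_lt_iff_lt_mul (by omega)]
    nlinarith [mul_le_mul_of_nonneg_left hr (show (0:Int) ≤ len by omega)]
  omega

-- small termination facts, kept as named lemmas so the loop bodies stay lean
theorem pvDecOne {L s : Int} (hs : 1 ≤ s) (hb : ¬ pvRem L s ≤ 1) :
    (L - (s + 1)).toNat < (L - s).toNat := by
  have := pvRem_two_le (len := L) hs (by omega); omega

theorem pvDecJump {L s : Int} (hs : 1 ≤ s) (hb : ¬ pvRem L s ≤ 1) :
    (L - PySem.Int.floordiv (L + pvRem L s - 2) (pvRem L s - 1)).toNat < (L - s).toNat := by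
  have h1 := pvJump_lt (len := L) hs (by omega)
  have h2 := pvJump_le (len := L) hs (by omega); omega

theorem pvOneLeSucc {s : Int} (h : 1 ≤ s) : 1 ≤ s + 1 := by omega

theorem pvJump_ge1 {len s : Int} (hs : 1 ≤ s) (hb : ¬ pvRem len s ≤ 1) :
    1 ≤ PySem.Int.floordiv (len + pvRem len s - 2) (pvRem len s - 1) := by
  have := pvJump_lt (len := len) hs (by omega); omega

-- Port of A: the while-loop as recursion on the state (s0,s1,s2); `longest = max(range(3), key=remaining)`
-- keeps the FIRST maximal index, transliterated as the nested strict comparisons below.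
def pvLoopA (nx ny nz cap s0 s1 s2 : Int) (h0 : 1 ≤ s0) (h1 : 1 ≤ s1) (h2 : 1 ≤ s2) :
    Int × Int × Int :=
  if hT : pvRem nx s0 * pvRem ny s1 * pvRem nz s2 > cap then
    if h01 : pvRem ny s1 > pvRem nx s0 then
      if h12 : pvRem nz s2 > pvRem ny s1 then
        if hb : pvRem nz s2 ≤ 1 then (s0, s1, s2)
        else pvLoopA nx ny nz cap s0 s1 (s2 + 1) h0 h1 (pvOneLeSucc h2)
      else
        if hb : pvRem ny s1 ≤ 1 then (s0, s1, s2)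
        else pvLoopA nx ny nz cap s0 (s1 + 1) s2 h0 (pvOneLeSucc h1) h2
    else
      if h02 : pvRem nz s2 > pvRem nx s0 then
        if hb : pvRem nz s2 ≤ 1 then (s0, s1, s2)
        else pvLoopA nx ny nz cap s0 s1 (s2 + 1) h0 h1 (pvOneLeSucc h2)
      else
        if hb : pvRem nx s0 ≤ 1 then (s0, s1, s2)
        else pvLoopA nx ny nz cap (s0 + 1) s1 s2 (pvOneLeSucc h0) h1 h2
  else (s0, s1, s2)
termination_by ((nx - s0).toNat + (ny - s1).toNat + (nz - s2).toNat)
decreasing_by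
  · exact Nat.add_lt_add_left (pvDecOne h2 hb) _
  · exact Nat.add_lt_add_right (Nat.add_lt_add_left (pvDecOne h1 hb) _) _
  · exact Nat.add_lt_add_left (pvDecOne h2 hb) _
  · exact Nat.add_lt_add_right (Nat.add_lt_add_right (pvDecOne h0 hb) _) _

def downsample_strides_3d_py (nx : Int) (ny : Int) (nz : Int) (cap : Int) : Int × Int × Int :=
  pvLoopA nx ny nz cap 1 1 1 le_rfl le_rfl le_rfl

-- ===== PORT B =====
-- B's loop: same selection of the longest axis, but the stride jumps to
-- (len + r - 2) // (r - 1), the smallest stride with ceil(len/stride) ≤ r - 1.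
def pvLoopB (nx ny nz cap s0 s1 s2 : Int) (h0 : 1 ≤ s0) (h1 : 1 ≤ s1) (h2 : 1 ≤ s2) :
    Int × Int × Int :=
  if hT : pvRem nx s0 * pvRem ny s1 * pvRem nz s2 > cap then
    if h01 : pvRem ny s1 > pvRem nx s0 then
      if h12 : pvRem nz s2 > pvRem ny s1 then
        if hb : pvRem nz s2 ≤ 1 then (s0, s1, s2)
        else pvLoopB nx ny nz cap s0 s1
          (PySem.Int.floordiv (nz + pvRem nz s2 - 2) (pvRem nz s2 - 1)) h0 h1 (pvJump_ge1 h2 hb)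
      else
        if hb : pvRem ny s1 ≤ 1 then (s0, s1, s2)
        else pvLoopB nx ny nz cap s0
          (PySem.Int.floordiv (ny + pvRem ny s1 - 2) (pvRem ny s1 - 1)) s2 h0 (pvJump_ge1 h1 hb) h2
    else
      if h02 : pvRem nz s2 > pvRem nx s0 then
        if hb : pvRem nz s2 ≤ 1 then (s0, s1, s2)
        else pvLoopB nx ny nz cap s0 s1
          (PySem.Int.floordiv (nz + pvRem nz s2 - 2) (pvRem nz s2 - 1)) h0 h1 (pvJump_ge1 h2 hb)
      else
        if hb : pvRem nx s0 ≤ 1 then (s0, s1, s2)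
        else pvLoopB nx ny nz cap
          (PySem.Int.floordiv (nx + pvRem nx s0 - 2) (pvRem nx s0 - 1)) s1 s2 (pvJump_ge1 h0 hb) h1 h2
  else (s0, s1, s2)
termination_by ((nx - s0).toNat + (ny - s1).toNat + (nz - s2).toNat)
decreasing_by
  · exact Nat.add_lt_add_left (pvDecJump h2 hb) _
  · exact Nat.add_lt_add_right (Nat.add_lt_add_left (pvDecJump h1 hb) _) _
  · exact Nat.add_lt_add_left (pvDecJump h2 hb) _
  · exact Nat.add_lt_add_right (Nat.add_lt_add_right (pvDecJump h0 hb) _) _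

def downsample_strides_3d_py_alt (nx : Int) (ny : Int) (nz : Int) (cap : Int) : Int × Int × Int :=
  pvLoopB nx ny nz cap 1 1 1 le_rfl le_rfl le_rfl

-- ===== PRECONDITION & SPEC =====
def Spec_downsample_strides_3d_py (nx : Int) (ny : Int) (nz : Int) (cap : Int) (out : Int × Int × Int) : Prop := out = downsample_strides_3d_py_alt nx ny nz cap
instance (nx : Int) (ny : Int) (nz : Int) (cap : Int) (out : Int × Int × Int) : Decidable (Spec_downsample_strides_3d_py nx ny nz cap out) := by unfold Spec_downsample_strides_3d_py; infer_instance

-- ===== CLAIM (what is proved, stated in full; the proofs are below) =====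
def Claim_equal_downsample_strides_3d_py : Prop := ∀ (nx : Int) (ny : Int) (nz : Int) (cap : Int), Dom_downsample_strides_3d_py nx ny nz cap → Spec_downsample_strides_3d_py nx ny nz cap (downsample_strides_3d_py nx ny nz cap)

-- ===== LEMMAS AND PROOFS =====

-- combined jump bracket for the equivalence proofs
theorem pvJump_bounds {len s : Int} (hs : 1 ≤ s) (hr : 2 ≤ pvRem len s) :
    s < PySem.Int.floordiv (len + pvRem len s - 2) (pvRem len s - 1) ∧
    PySem.Int.floordiv (len + pvRem len s - 2) (pvRem len s - 1) ≤ len :=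
  ⟨pvJump_lt hs hr, pvJump_le hs hr⟩


-- On the plateau s ≤ m < jump target, the remaining count is unchanged.
theorem pvRem_plateau {len s m : Int} (hs : 1 ≤ s) (hr : 2 ≤ pvRem len s) (hm : s ≤ m)
    (hmt : m < PySem.Int.floordiv (len + pvRem len s - 2) (pvRem len s - 1)) :
    pvRem len m = pvRem len s := by
  set r := pvRem len s with hrdef
  have hchar : r * s ≤ len + s - 1 ∧ len + s - 1 < (r + 1) * s :=
    (PySem.Int.floordiv_eq_iff_of_pos (by omega)).mp hrdef.symm
  set t := PySem.Int.floordiv (len + r - 2) (r - 1) with htdef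
  have htchar : t * (r - 1) ≤ len + r - 2 ∧ len + r - 2 < (t + 1) * (r - 1) :=
    (PySem.Int.floordiv_eq_iff_of_pos (by omega)).mp htdef.symm
  have hm0 : 0 < m := by omega
  refine (PySem.Int.floordiv_eq_iff_of_pos hm0).mpr ⟨?_, ?_⟩
  · -- r * m ≤ len + m - 1, i.e. (r-1)*m < len : from m ≤ t - 1 and (t-1)(r-1) < len
    nlinarith [htchar.1]
  · -- len + m - 1 < (r+1)*m, i.e. len ≤ r*m : from len ≤ r*s and s ≤ m
    nlinarith [hchar.2]

-- Climbing a plateau on axis 0: A's +1 steps do not change any branch condition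
-- until the stride reaches t0, so the loop result from s0 equals the one from t0.
theorem pvLoopA_climb0 (nx ny nz cap : Int) :
    ∀ (k : Nat) (s0 s1 s2 t0 : Int) (h0 : 1 ≤ s0) (h1 : 1 ≤ s1) (h2 : 1 ≤ s2) (ht0 : 1 ≤ t0)
      (hk : t0 = s0 + k)
      (hplat : ∀ j : Int, s0 ≤ j → j < t0 → pvRem nx j = pvRem nx s0)
      (hr : 2 ≤ pvRem nx s0)
      (hb1 : ¬ pvRem ny s1 > pvRem nx s0) (hb2 : ¬ pvRem nz s2 > pvRem nx s0)
      (hcap : pvRem nx s0 * pvRem ny s1 * pvRem nz s2 > cap),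
    pvLoopA nx ny nz cap s0 s1 s2 h0 h1 h2 = pvLoopA nx ny nz cap t0 s1 s2 ht0 h1 h2 := by
  intro k
  induction k with
  | zero =>
    intro s0 s1 s2 t0 h0 h1 h2 ht0 hk _ _ _ _ _
    obtain rfl : t0 = s0 := by push_cast at hk; omega
    rfl
  | succ n ih =>
    intro s0 s1 s2 t0 h0 h1 h2 ht0 hk hplat hr hb1 hb2 hcap
    rw [pvLoopA, dif_pos hcap, dif_neg hb1, dif_neg hb2,
      dif_neg (show ¬ pvRem nx s0 ≤ 1 by omega)]
    rcases Nat.eq_zero_or_pos n with hn | hn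
    · subst hn
      obtain rfl : t0 = s0 + 1 := by push_cast at hk; omega
      rfl
    · exact ih (s0 + 1) s1 s2 t0 (by omega) h1 h2 ht0 (by push_cast at hk ⊢; omega)
        (fun j hj hjt => by
          rw [hplat j (by omega) hjt,
            hplat (s0 + 1) (by omega) (by push_cast at hk; omega)])
        (by rw [hplat (s0 + 1) (by omega) (by push_cast at hk; omega)]; exact hr)
        (by rw [hplat (s0 + 1) (by omega) (by push_cast at hk; omega)]; exact hb1)
        (by rw [hplat (s0 + 1) (by omega) (by push_cast at hk; omega)]; exact hb2)
        (by rw [hplat (s0 + 1) (by omega) (by push_cast at hk; omega)]; exact hcap)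

-- Climbing a plateau on axis 1.
theorem pvLoopA_climb1 (nx ny nz cap : Int) :
    ∀ (k : Nat) (s0 s1 s2 t1 : Int) (h0 : 1 ≤ s0) (h1 : 1 ≤ s1) (h2 : 1 ≤ s2) (ht1 : 1 ≤ t1)
      (hk : t1 = s1 + k)
      (hplat : ∀ j : Int, s1 ≤ j → j < t1 → pvRem ny j = pvRem ny s1)
      (hr : 2 ≤ pvRem ny s1)
      (hb1 : pvRem ny s1 > pvRem nx s0) (hb2 : ¬ pvRem nz s2 > pvRem ny s1)
      (hcap : pvRem nx s0 * pvRem ny s1 * pvRem nz s2 > cap),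
    pvLoopA nx ny nz cap s0 s1 s2 h0 h1 h2 = pvLoopA nx ny nz cap s0 t1 s2 h0 ht1 h2 := by
  intro k
  induction k with
  | zero =>
    intro s0 s1 s2 t1 h0 h1 h2 ht1 hk _ _ _ _ _
    obtain rfl : t1 = s1 := by push_cast at hk; omega
    rfl
  | succ n ih =>
    intro s0 s1 s2 t1 h0 h1 h2 ht1 hk hplat hr hb1 hb2 hcap
    rw [pvLoopA, dif_pos hcap, dif_pos hb1, dif_neg hb2,
      dif_neg (show ¬ pvRem ny s1 ≤ 1 by omega)]
    rcases Nat.eq_zero_or_pos n with hn | hn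
    · subst hn
      obtain rfl : t1 = s1 + 1 := by push_cast at hk; omega
      rfl
    · exact ih s0 (s1 + 1) s2 t1 h0 (by omega) h2 ht1 (by push_cast at hk ⊢; omega)
        (fun j hj hjt => by
          rw [hplat j (by omega) hjt,
            hplat (s1 + 1) (by omega) (by push_cast at hk; omega)])
        (by rw [hplat (s1 + 1) (by omega) (by push_cast at hk; omega)]; exact hr)
        (by rw [hplat (s1 + 1) (by omega) (by push_cast at hk; omega)]; exact hb1)
        (by rw [hplat (s1 + 1) (by omega) (by push_cast at hk; omega)]; exact hb2)
        (by rw [hplat (s1 + 1) (by omega) (by push_cast at hk; omega)]; exact hcap)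

-- Climbing a plateau on axis 2 (reachable through either comparison chain).
theorem pvLoopA_climb2 (nx ny nz cap : Int) :
    ∀ (k : Nat) (s0 s1 s2 t2 : Int) (h0 : 1 ≤ s0) (h1 : 1 ≤ s1) (h2 : 1 ≤ s2) (ht2 : 1 ≤ t2)
      (hk : t2 = s2 + k)
      (hplat : ∀ j : Int, s2 ≤ j → j < t2 → pvRem nz j = pvRem nz s2)
      (hr : 2 ≤ pvRem nz s2)
      (hbr : (pvRem ny s1 > pvRem nx s0 ∧ pvRem nz s2 > pvRem ny s1) ∨
             (¬ pvRem ny s1 > pvRem nx s0 ∧ pvRem nz s2 > pvRem nx s0))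
      (hcap : pvRem nx s0 * pvRem ny s1 * pvRem nz s2 > cap),
    pvLoopA nx ny nz cap s0 s1 s2 h0 h1 h2 = pvLoopA nx ny nz cap s0 s1 t2 h0 h1 ht2 := by
  intro k
  induction k with
  | zero =>
    intro s0 s1 s2 t2 h0 h1 h2 ht2 hk _ _ _ _
    obtain rfl : t2 = s2 := by push_cast at hk; omega
    rfl
  | succ n ih =>
    intro s0 s1 s2 t2 h0 h1 h2 ht2 hk hplat hr hbr hcap
    have hunf : pvLoopA nx ny nz cap s0 s1 s2 h0 h1 h2 =
        pvLoopA nx ny nz cap s0 s1 (s2 + 1) h0 h1 (by omega) := by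
      rcases hbr with ⟨ha, hb⟩ | ⟨ha, hb⟩
      · rw [pvLoopA, dif_pos hcap, dif_pos ha, dif_pos hb,
          dif_neg (show ¬ pvRem nz s2 ≤ 1 by omega)]
      · rw [pvLoopA, dif_pos hcap, dif_neg ha, dif_pos hb,
          dif_neg (show ¬ pvRem nz s2 ≤ 1 by omega)]
    rw [hunf]
    rcases Nat.eq_zero_or_pos n with hn | hn
    · subst hn
      obtain rfl : t2 = s2 + 1 := by push_cast at hk; omega
      rfl
    · exact ih s0 s1 (s2 + 1) t2 h0 h1 (by omega) ht2 (by push_cast at hk ⊢; omega)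
        (fun j hj hjt => by
          rw [hplat j (by omega) hjt,
            hplat (s2 + 1) (by omega) (by push_cast at hk; omega)])
        (by rw [hplat (s2 + 1) (by omega) (by push_cast at hk; omega)]; exact hr)
        (by rw [hplat (s2 + 1) (by omega) (by push_cast at hk; omega)]; exact hbr)
        (by rw [hplat (s2 + 1) (by omega) (by push_cast at hk; omega)]; exact hcap)

-- Main loop equivalence, by strong induction on the remaining-room measure.
theorem pvLoop_eq (nx ny nz cap : Int) :
    ∀ (N : Nat) (s0 s1 s2 : Int) (h0 : 1 ≤ s0) (h1 : 1 ≤ s1) (h2 : 1 ≤ s2),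
      (nx - s0).toNat + (ny - s1).toNat + (nz - s2).toNat ≤ N →
      pvLoopA nx ny nz cap s0 s1 s2 h0 h1 h2 = pvLoopB nx ny nz cap s0 s1 s2 h0 h1 h2 := by
  intro N
  induction N with
  | zero =>
    intro s0 s1 s2 h0 h1 h2 hN
    rw [pvLoopA, pvLoopB]
    by_cases hT : pvRem nx s0 * pvRem ny s1 * pvRem nz s2 > cap
    · rw [dif_pos hT, dif_pos hT]
      by_cases h01 : pvRem ny s1 > pvRem nx s0
      · rw [dif_pos h01, dif_pos h01]
        by_cases h12 : pvRem nz s2 > pvRem ny s1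
        · rw [dif_pos h12, dif_pos h12]
          have hb : pvRem nz s2 ≤ 1 := by
            by_contra hb
            have := pvRem_two_le h2 (by omega : (2:Int) ≤ pvRem nz s2); omega
          rw [dif_pos hb, dif_pos hb]
        · rw [dif_neg h12, dif_neg h12]
          have hb : pvRem ny s1 ≤ 1 := by
            by_contra hb
            have := pvRem_two_le h1 (by omega : (2:Int) ≤ pvRem ny s1); omega
          rw [dif_pos hb, dif_pos hb]
      · rw [dif_neg h01, dif_neg h01]
        by_cases h02 : pvRem nz s2 > pvRem nx s0
        · rw [dif_pos h02, dif_pos h02]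
          have hb : pvRem nz s2 ≤ 1 := by
            by_contra hb
            have := pvRem_two_le h2 (by omega : (2:Int) ≤ pvRem nz s2); omega
          rw [dif_pos hb, dif_pos hb]
        · rw [dif_neg h02, dif_neg h02]
          have hb : pvRem nx s0 ≤ 1 := by
            by_contra hb
            have := pvRem_two_le h0 (by omega : (2:Int) ≤ pvRem nx s0); omega
          rw [dif_pos hb, dif_pos hb]
    · rw [dif_neg hT, dif_neg hT]
  | succ N ih =>
    intro s0 s1 s2 h0 h1 h2 hN
    by_cases hT : pvRem nx s0 * pvRem ny s1 * pvRem nz s2 > cap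
    · by_cases h01 : pvRem ny s1 > pvRem nx s0
      · by_cases h12 : pvRem nz s2 > pvRem ny s1
        · by_cases hb : pvRem nz s2 ≤ 1
          · rw [pvLoopA, pvLoopB, dif_pos hT, dif_pos hT, dif_pos h01, dif_pos h01,
              dif_pos h12, dif_pos h12, dif_pos hb, dif_pos hb]
          · -- stride axis 2: A climbs the plateau, B jumps to t
            have hr : (2:Int) ≤ pvRem nz s2 := by omega
            have hj := pvJump_bounds h2 hr
            have hlen := pvRem_two_le h2 hr
            have hA := pvLoopA_climb2 nx ny nz cap
              (PySem.Int.floordiv (nz + pvRem nz s2 - 2) (pvRem nz s2 - 1) - s2).toNat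
              s0 s1 s2 (PySem.Int.floordiv (nz + pvRem nz s2 - 2) (pvRem nz s2 - 1))
              h0 h1 h2 (by omega) (by omega)
              (fun j hj' hjt => pvRem_plateau h2 hr hj' hjt) hr (Or.inl ⟨h01, h12⟩) hT
            rw [hA, pvLoopB, dif_pos hT, dif_pos h01, dif_pos h12, dif_neg hb]
            exact ih s0 s1 _ h0 h1 (by omega) (by omega)
        · by_cases hb : pvRem ny s1 ≤ 1
          · rw [pvLoopA, pvLoopB, dif_pos hT, dif_pos hT, dif_pos h01, dif_pos h01,
              dif_neg h12, dif_neg h12, dif_pos hb, dif_pos hb]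
          · -- stride axis 1
            have hr : (2:Int) ≤ pvRem ny s1 := by omega
            have hj := pvJump_bounds h1 hr
            have hlen := pvRem_two_le h1 hr
            have hA := pvLoopA_climb1 nx ny nz cap
              (PySem.Int.floordiv (ny + pvRem ny s1 - 2) (pvRem ny s1 - 1) - s1).toNat
              s0 s1 s2 (PySem.Int.floordiv (ny + pvRem ny s1 - 2) (pvRem ny s1 - 1))
              h0 h1 h2 (by omega) (by omega)
              (fun j hj' hjt => pvRem_plateau h1 hr hj' hjt) hr h01 h12 hT
            rw [hA, pvLoopB, dif_pos hT, dif_pos h01, dif_neg h12, dif_neg hb]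
            exact ih s0 _ s2 h0 (by omega) h2 (by omega)
      · by_cases h02 : pvRem nz s2 > pvRem nx s0
        · by_cases hb : pvRem nz s2 ≤ 1
          · rw [pvLoopA, pvLoopB, dif_pos hT, dif_pos hT, dif_neg h01, dif_neg h01,
              dif_pos h02, dif_pos h02, dif_pos hb, dif_pos hb]
          · -- stride axis 2 through the other comparison chain
            have hr : (2:Int) ≤ pvRem nz s2 := by omega
            have hj := pvJump_bounds h2 hr
            have hlen := pvRem_two_le h2 hr
            have hA := pvLoopA_climb2 nx ny nz cap
              (PySem.Int.floordiv (nz + pvRem nz s2 - 2) (pvRem nz s2 - 1) - s2).toNat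
              s0 s1 s2 (PySem.Int.floordiv (nz + pvRem nz s2 - 2) (pvRem nz s2 - 1))
              h0 h1 h2 (by omega) (by omega)
              (fun j hj' hjt => pvRem_plateau h2 hr hj' hjt) hr (Or.inr ⟨h01, h02⟩) hT
            rw [hA, pvLoopB, dif_pos hT, dif_neg h01, dif_pos h02, dif_neg hb]
            exact ih s0 s1 _ h0 h1 (by omega) (by omega)
        · by_cases hb : pvRem nx s0 ≤ 1
          · rw [pvLoopA, pvLoopB, dif_pos hT, dif_pos hT, dif_neg h01, dif_neg h01,
              dif_neg h02, dif_neg h02, dif_pos hb, dif_pos hb]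
          · -- stride axis 0
            have hr : (2:Int) ≤ pvRem nx s0 := by omega
            have hj := pvJump_bounds h0 hr
            have hlen := pvRem_two_le h0 hr
            have hA := pvLoopA_climb0 nx ny nz cap
              (PySem.Int.floordiv (nx + pvRem nx s0 - 2) (pvRem nx s0 - 1) - s0).toNat
              s0 s1 s2 (PySem.Int.floordiv (nx + pvRem nx s0 - 2) (pvRem nx s0 - 1))
              h0 h1 h2 (by omega) (by omega)
              (fun j hj' hjt => pvRem_plateau h0 hr hj' hjt) hr h01 h02 hT
            rw [hA, pvLoopB, dif_pos hT, dif_neg h01, dif_neg h02, dif_neg hb]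
            exact ih _ s1 s2 (by omega) h1 h2 (by omega)
    · rw [pvLoopA, pvLoopB, dif_neg hT, dif_neg hT]

-- ===== VERDICT (by name: the statement is the Claim_ definition above) =====
theorem downsample_strides_3d_py_spec : Claim_equal_downsample_strides_3d_py := by
  intro nx ny nz cap _
  unfold Spec_downsample_strides_3d_py downsample_strides_3d_py downsample_strides_3d_py_alt
  exact pvLoop_eq nx ny nz cap _ 1 1 1 le_rfl le_rfl le_rfl le_rfl
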